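-- pv_equiv track=rewrite | github.com/whlg0501/2018_PAT | 1012.py | case2
-- ===== SOURCE A (Python) =====
-- def case2(lst):
--     """将被5除后余1的数字按给出顺序进行交错求和:计算n1-n2+n3-n4..."""
--     legal_numbers = []
--     sum = 0
--     result = ""
--
--     for i in lst:
--         if(i % 5 == 1):
--             legal_numbers.append(i)
--
--     if(legal_numbers):
--         for i in range(0, len(legal_numbers)):
--             if(i % 2 == 0):
--                 sum += legal_numbers[i]
--             else:
--                 sum += -legal_numbers[i]
--         result = str(sum)
--     else:
--         result = "N"
--
--     return result
-- ===== SOURCE B (Python) =====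
-- def case2(lst):
--     """Alternating sum n1-n2+n3-... of the numbers ≡ 1 (mod 5), pairwise via an iterator."""
--     legal = [i for i in lst if i % 5 == 1]
--     if not legal:
--         return "N"
--     total = 0
--     it = iter(legal)
--     for x in it:
--         total += x - next(it, 0)
--     return str(total)
-- ===== Notes on version B (the rewrite author's own statement) =====
-- stated objective: alternative
-- what changed: A toggles the sign by index parity in a single indexed loop over the filtered list; B consumes the filtered list pairwise through an iterator, adding x - y per pair (with 0 for a missing partner), so no index or parity test appears.
import Mathlib
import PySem

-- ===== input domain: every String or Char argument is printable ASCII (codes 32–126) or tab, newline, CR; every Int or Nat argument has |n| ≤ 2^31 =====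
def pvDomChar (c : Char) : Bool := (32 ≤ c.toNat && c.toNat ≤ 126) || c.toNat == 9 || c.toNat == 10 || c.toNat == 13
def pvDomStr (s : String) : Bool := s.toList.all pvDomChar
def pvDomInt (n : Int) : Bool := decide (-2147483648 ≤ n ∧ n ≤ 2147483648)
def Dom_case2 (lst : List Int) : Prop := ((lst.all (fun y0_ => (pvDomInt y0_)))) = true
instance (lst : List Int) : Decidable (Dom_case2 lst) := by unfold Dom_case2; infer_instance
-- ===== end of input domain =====

-- B replaces A's index-parity sign toggle by consuming the filtered list pairwise (x - y per pair); same cost, no index arithmetic.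

-- ===== PORT A =====
def case2 (lst : List Int) : String :=
  let legal := lst.foldl (fun acc i => if PySem.Int.mod i 5 == 1 then acc ++ [i] else acc) []
  if legal.isEmpty = false then
    -- legal[i]: 0 ≤ i < len(legal) throughout the range, so pyGetD's default is never used (exact)
    let sum := (PySem.List.pyRange 0 (legal.length : Int) 1).foldl
      (fun s i => if PySem.Int.mod i 2 == 0 then s + PySem.List.pyGetD legal i 0
                  else s + -(PySem.List.pyGetD legal i 0)) 0
    PySem.Int.toStr sum
  else "N"

-- ===== PORT B =====
-- the 'for x in it: total += x - next(it, 0)' loop: two elements per step, 0 when the iterator is exhausted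
def altLoop : List Int → Int → Int
  | [], total => total
  | [x], total => total + (x - 0)
  | x :: y :: r, total => altLoop r (total + (x - y))

def case2_alt (lst : List Int) : String :=
  let legal := lst.filter (fun i => PySem.Int.mod i 5 == 1)
  if legal = [] then "N" else PySem.Int.toStr (altLoop legal 0)

-- ===== PRECONDITION & SPEC =====
def Spec_case2 (lst : List Int) (out : String) : Prop := out = case2_alt lst
instance (lst : List Int) (out : String) : Decidable (Spec_case2 lst out) := by unfold Spec_case2; infer_instance

-- ===== CLAIM (what is proved, stated in full; the proofs are below) =====
def Claim_equal_case2 : Prop := ∀ (lst : List Int), Dom_case2 lst → Spec_case2 lst (case2 lst)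

-- ===== LEMMAS AND PROOFS =====

/-- reference alternating sum: x₁ - x₂ + x₃ - … -/
def altsum : List Int → Int
  | [] => 0
  | x :: r => x - altsum r

theorem altLoop_eq_altsum : ∀ (l : List Int) (t : Int), altLoop l t = t + altsum l
  | [], t => by simp [altLoop, altsum]
  | [x], t => by simp [altLoop, altsum]
  | x :: y :: r, t => by
      rw [altLoop, altLoop_eq_altsum r]
      simp [altsum]; ring

/-- A's enumerate-shaped fold computes ±altsum, sign given by the parity of the start index. -/
theorem enum_fold_eq (l : List Int) : ∀ (i a : Int), 0 ≤ i →
    (PySem.List.enumerate l i).foldl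
      (fun s p => if PySem.Int.mod p.1 2 == 0 then s + p.2 else s + -p.2) a
    = a + (if PySem.Int.mod i 2 == 0 then altsum l else -altsum l) := by
  induction l with
  | nil => intro i a _; simp [PySem.List.enumerate_nil, altsum]
  | cons x r ih =>
    intro i a hi
    rw [PySem.List.enumerate_cons, List.foldl_cons, ih (i+1) _ (by omega)]
    have h2 : (0:Int) < 2 := by norm_num
    rw [PySem.Int.mod_eq_emod_of_pos (a := i) h2, PySem.Int.mod_eq_emod_of_pos (a := i+1) h2]
    rcases Int.emod_two_eq_zero_or_one i with h | h
    · have h1 : (i+1) % 2 = 1 := by omega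
      simp [h, h1, altsum]; ring
    · have h1 : (i+1) % 2 = 0 := by omega
      simp [h, h1, altsum]; ring

theorem A_sum_eq (legal : List Int) :
    (PySem.List.pyRange 0 (legal.length : Int) 1).foldl
      (fun s i => if PySem.Int.mod i 2 == 0 then s + PySem.List.pyGetD legal i 0
                  else s + -(PySem.List.pyGetD legal i 0)) 0
    = altsum legal := by
  have he := PySem.List.enumerate_eq_map_pyRange legal (0:Int)
  have : (PySem.List.enumerate legal 0).foldl
      (fun s p => if PySem.Int.mod p.1 2 == 0 then s + p.2 else s + -p.2) 0
      = (PySem.List.pyRange 0 (legal.length : Int) 1).foldl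
      (fun s i => if PySem.Int.mod i 2 == 0 then s + PySem.List.pyGetD legal i 0
                  else s + -(PySem.List.pyGetD legal i 0)) 0 := by
    rw [he, List.foldl_map]
    simp [PySem.List.len_eq]
  rw [← this, enum_fold_eq legal 0 0 le_rfl]
  norm_num [PySem.Int.mod]

-- ===== VERDICT (by name: the statement is the Claim_ definition above) =====
theorem case2_spec : Claim_equal_case2 := by
  intro lst _
  unfold Spec_case2 case2 case2_alt
  rw [PySem.List.foldl_append_if_eq_filter]
  simp only [List.nil_append]
  set legal := lst.filter (fun i => PySem.Int.mod i 5 == 1) with hl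
  by_cases h : legal = []
  · simp [h]
  · rw [if_pos (by simp [h]), if_neg h, A_sum_eq, altLoop_eq_altsum, zero_add]
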